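-- pv_equiv track=rewrite | github.com/kopytova/py-algo | hw3_9.py | find_max_in_mins
-- ===== SOURCE A (Python) =====
-- def find_max_in_mins(matrix):
--     height = len(matrix)     # высота матрицы (кол-во строк)
--     width = len(matrix[0])   # ширина матрицы (кол-во элементов в строке)
--     min_nums_in_columns = []
--     for j in range(width):
--         min_num = matrix[0][j]
--         for i in range(1, height):
--             num = matrix[i][j]
--             if num < min_num:
--                 min_num = num
--         min_nums_in_columns.append(min_num)
--     max_in_mins = max(min_nums_in_columns)
--     return max_in_mins
-- ===== SOURCE B (Python) =====
-- def find_max_in_mins(matrix):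
--     width = len(matrix[0])
--     rest = matrix[1:]
--     best = matrix[0][0]
--     for row in rest:
--         if row[0] < best:
--             best = row[0]
--     for j in range(1, width):
--         cur = matrix[0][j]
--         if cur <= best:
--             continue
--         for row in rest:
--             x = row[j]
--             if x < cur:
--                 cur = x
--                 if cur <= best:
--                     break
--         if cur > best:
--             best = cur
--     return best
-- ===== Notes on version B (the rewrite author's own statement) =====
-- stated objective: alternative
-- what changed: Replaces A's exhaustive per-column minimum scans by a branch-and-bound search: it keeps the best max-of-mins found so far, skips any column whose first element cannot beat it, and breaks out of a column scan as soon as the running minimum drops to the current best.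
import Mathlib
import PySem

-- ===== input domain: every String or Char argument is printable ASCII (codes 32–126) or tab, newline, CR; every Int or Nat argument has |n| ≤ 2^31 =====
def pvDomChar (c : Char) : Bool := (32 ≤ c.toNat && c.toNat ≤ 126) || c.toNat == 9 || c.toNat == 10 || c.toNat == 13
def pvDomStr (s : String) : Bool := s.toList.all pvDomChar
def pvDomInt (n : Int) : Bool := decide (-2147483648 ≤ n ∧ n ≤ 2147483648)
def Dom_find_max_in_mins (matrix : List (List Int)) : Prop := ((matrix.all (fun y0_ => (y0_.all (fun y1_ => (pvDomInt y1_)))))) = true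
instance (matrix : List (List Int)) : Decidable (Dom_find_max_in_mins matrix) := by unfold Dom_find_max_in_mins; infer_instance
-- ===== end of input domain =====

-- B replaces A's exhaustive column-minimum scans by a branch-and-bound search: it keeps the
-- best max-of-mins found so far, skips any column whose first element already cannot beat it,
-- and aborts a column scan as soon as its running minimum drops to the current best
-- (alternative algorithm; same worst-case cost).

-- ===== PORT A =====
def find_max_in_mins (matrix : List (List Int)) : Int :=
  let height : Int := matrix.length
  let width : Int := ((PySem.List.pyGetD matrix 0 []).length : Int)
  let min_nums_in_columns :=
    (PySem.List.pyRange 0 width 1).foldl (fun acc j =>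
      let min_num := PySem.List.pyGetD (PySem.List.pyGetD matrix 0 []) j 0
      let m := (PySem.List.pyRange 1 height 1).foldl (fun min_num i =>
        let num := PySem.List.pyGetD (PySem.List.pyGetD matrix i []) j 0
        if num < min_num then num else min_num) min_num
      acc ++ [m]) ([] : List Int)
  (PySem.List.max? min_nums_in_columns (fun y => y)).getD 0

-- ===== PORT B =====
-- inner column scan with early break: 'for row in rest: x = row[j]; if x < cur: cur = x; if cur <= best: break'
def pvScanCol : List (List Int) → Int → Int → Int → Int
  | [], _, cur, _ => cur
  | row :: rs, j, cur, best =>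
      let x := PySem.List.pyGetD row j 0
      if x < cur then (if x ≤ best then x else pvScanCol rs j x best)
      else pvScanCol rs j cur best

def find_max_in_mins_alt (matrix : List (List Int)) : Int :=
  let width : Int := ((PySem.List.pyGetD matrix 0 []).length : Int)
  let rest := PySem.List.slice matrix (some 1) none
  let best0 := rest.foldl (fun best row =>
      if PySem.List.pyGetD row 0 0 < best then PySem.List.pyGetD row 0 0 else best)
    (PySem.List.pyGetD (PySem.List.pyGetD matrix 0 []) 0 0)
  (PySem.List.pyRange 1 width 1).foldl (fun best j =>
      let cur := PySem.List.pyGetD (PySem.List.pyGetD matrix 0 []) j 0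
      if cur ≤ best then best
      else
        let cur' := pvScanCol rest j cur best
        if best < cur' then cur' else best) best0

-- ===== PRECONDITION & SPEC =====
-- Pre_ excludes exactly the inputs where Python A raises: the empty matrix (IndexError on
-- matrix[0]), an empty first row (ValueError on max([])), and jagged matrices with a row
-- shorter than the first (IndexError in the inner loop).
def Pre_find_max_in_mins (matrix : List (List Int)) : Prop :=
  matrix ≠ [] ∧ matrix.headD [] ≠ [] ∧
  ∀ row ∈ matrix, (matrix.headD []).length ≤ row.length
instance (matrix : List (List Int)) : Decidable (Pre_find_max_in_mins matrix) := by
  unfold Pre_find_max_in_mins; infer_instance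
def pvWitness_find_max_in_mins : List (List Int) := [[1, 2], [3, 0]]
def Spec_find_max_in_mins (matrix : List (List Int)) (out : Int) : Prop := out = find_max_in_mins_alt matrix
instance (matrix : List (List Int)) (out : Int) : Decidable (Spec_find_max_in_mins matrix out) := by unfold Spec_find_max_in_mins; infer_instance

-- ===== CLAIM =====
def Claim_equal_find_max_in_mins : Prop := ∀ (matrix : List (List Int)), Dom_find_max_in_mins matrix → Pre_find_max_in_mins matrix → Spec_find_max_in_mins matrix (find_max_in_mins matrix)

-- ===== LEMMAS AND PROOFS =====

-- the (unpruned) column-minimum fold over the remaining rows, shared shape of both sides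
def pvColMin (rs : List (List Int)) (j init : Int) : Int :=
  rs.foldl (fun mn row =>
    if PySem.List.pyGetD row j 0 < mn then PySem.List.pyGetD row j 0 else mn) init

theorem pvColMin_le_init (rs : List (List Int)) (j init : Int) : pvColMin rs j init ≤ init := by
  induction rs generalizing init with
  | nil => simp [pvColMin]
  | cons row rs ih =>
    simp only [pvColMin, List.foldl_cons]
    refine le_trans (ih _) ?_
    split_ifs with h <;> omega

-- the pruned scan either computes the true column minimum, or both it and the true
-- minimum are already ≤ best (in which case the outer loop keeps best either way)
theorem pvScanCol_spec (rs : List (List Int)) (j cur best : Int) :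
    pvScanCol rs j cur best = pvColMin rs j cur ∨
    (pvScanCol rs j cur best ≤ best ∧ pvColMin rs j cur ≤ best) := by
  induction rs generalizing cur with
  | nil => left; simp [pvScanCol, pvColMin]
  | cons row rs ih =>
    simp only [pvScanCol, pvColMin, List.foldl_cons]
    split_ifs with h1 h2
    · right
      exact ⟨h2, le_trans (pvColMin_le_init rs j _) h2⟩
    · exact ih _
    · exact ih _

-- one step of B's outer loop equals max best (column minimum)
theorem pvStep_eq_max (rest : List (List Int)) (j cur best : Int) :
    (if cur ≤ best then best
     else if best < pvScanCol rest j cur best then pvScanCol rest j cur best else best)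
    = max best (pvColMin rest j cur) := by
  by_cases h : cur ≤ best
  · have hm : pvColMin rest j cur ≤ best := le_trans (pvColMin_le_init rest j cur) h
    simp [h, max_eq_left hm]
  · rcases pvScanCol_spec rest j cur best with he | ⟨h1, h2⟩
    · simp only [h, if_false, he, max_def]
      split_ifs <;> omega
    · simp only [h, if_false, max_def]
      split_ifs <;> omega

theorem find_max_in_mins_spec : Claim_equal_find_max_in_mins := by
  intro matrix _ hpre
  obtain ⟨hne, hhead, _⟩ := hpre
  obtain ⟨r0, rest, rfl⟩ : ∃ r0 rest, matrix = r0 :: rest := by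
    cases matrix with
    | nil => exact absurd rfl hne
    | cons a b => exact ⟨a, b, rfl⟩
  unfold Spec_find_max_in_mins find_max_in_mins find_max_in_mins_alt
  simp only [PySem.List.pyGetD_zero_cons, PySem.List.slice_from_one, List.tail_cons]
  -- A's outer loop builds the list of column minima: rewrite it to a map over columns
  rw [PySem.List.foldl_append_singleton_eq_map]
  -- A's inner loop over row indices 1..height is the fold pvColMin over the remaining rows
  have hinner : ∀ j : Int,
      (PySem.List.pyRange 1 ((r0 :: rest : List (List Int)).length : Int) 1).foldl
        (fun min_num i =>
          let num := PySem.List.pyGetD (PySem.List.pyGetD (r0 :: rest) i []) j 0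
          if num < min_num then num else min_num)
        (PySem.List.pyGetD r0 j 0)
      = pvColMin rest j (PySem.List.pyGetD r0 j 0) := by
    intro j
    rw [PySem.List.foldl_pyRange_pyGetD' (a := 1) (xs := r0 :: rest)
        (f := fun mn row => let num := PySem.List.pyGetD row j 0;
              if num < mn then num else mn) (d := ([] : List Int))
        (init := PySem.List.pyGetD r0 j 0) (by norm_num)]
    simp [pvColMin]
  simp only [hinner]
  -- first row nonempty: width > 0, so column 0 splits off
  have hw : (0 : Int) < (r0.length : Int) := by
    cases r0 with
    | nil => exact absurd rfl hhead
    | cons a t => simp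
  rw [PySem.List.pyRange_one_cons hw, List.map_cons]
  simp only [List.nil_append, zero_add]
  rw [PySem.List.max?_id_cons, Option.getD_some, List.foldl_map]
  -- B's first pass is pvColMin at column 0, and each outer step is max with the column min
  have hfun : (fun (best j : Int) =>
      let cur := PySem.List.pyGetD r0 j 0
      if cur ≤ best then best
      else
        let cur' := pvScanCol rest j cur best
        if best < cur' then cur' else best)
    = fun (b j : Int) => max b (pvColMin rest j (PySem.List.pyGetD r0 j 0)) := by
    funext b j
    exact pvStep_eq_max rest j _ b
  rw [hfun]
  norm_num [pvColMin]
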